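-- pv_equiv track=rewrite | github.com/AnkitVeerhub/DSA | MY DSA Practice Set/PYTHON/Revision/Find the Length of Subarray with Maximum Sum (Brute Force).py | maximum_subarray_sum_length
-- ===== SOURCE A (Python) =====
-- def maximum_subarray_sum_length(nums):
--     n = len(nums)
--     max_length = 0
--     max_sum = float('-inf')
--     for i in range(n):
--         current_sum = 0
--         for j in range(i, n):
--             # Calculating Current Subarray Sum
--             current_sum += nums[j]
--             if current_sum > max_sum:
--                 max_sum = current_sum
--                 max_length = j - i + 1
--     return max_length
-- ===== SOURCE B (Python) =====
-- def maximum_subarray_sum_length(nums):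
--     # O(n): prefix sums + right-to-left suffix maximum of the prefix array
--     # (earliest index wins ties), then one left-to-right pass picking the
--     # first strictly-improving subarray sum, matching A's lexicographic
--     # tie-break (smallest i, then smallest j).
--     n = len(nums)
--     prefix = [0]
--     run = 0
--     for x in nums:
--         run += x
--         prefix.append(run)
--     # suffix[k] = (max prefix[t] for t in [k, n], earliest such t)
--     mv, mk = prefix[n], n
--     rev = [(mv, mk)]
--     for k in range(n - 1, -1, -1):
--         if prefix[k] >= mv:
--             mv, mk = prefix[k], k
--         rev.append((mv, mk))
--     suffix = rev[::-1]
--     best_len = 0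
--     best_sum = None
--     for i in range(n):
--         s, k = suffix[i + 1]
--         s -= prefix[i]
--         if best_sum is None or s > best_sum:
--             best_sum = s
--             best_len = k - i
--     return best_len
-- ===== Notes on version B (the rewrite author's own statement) =====
-- stated objective: faster
-- what changed: Replaces A's O(n^2) nested scan over all (i,j) subarrays by prefix sums plus a right-to-left suffix maximum of the prefix array (earliest index on ties) and one left-to-right pass, preserving A's strict-improvement (smallest i, then smallest j) tie-break.
import Mathlib
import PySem

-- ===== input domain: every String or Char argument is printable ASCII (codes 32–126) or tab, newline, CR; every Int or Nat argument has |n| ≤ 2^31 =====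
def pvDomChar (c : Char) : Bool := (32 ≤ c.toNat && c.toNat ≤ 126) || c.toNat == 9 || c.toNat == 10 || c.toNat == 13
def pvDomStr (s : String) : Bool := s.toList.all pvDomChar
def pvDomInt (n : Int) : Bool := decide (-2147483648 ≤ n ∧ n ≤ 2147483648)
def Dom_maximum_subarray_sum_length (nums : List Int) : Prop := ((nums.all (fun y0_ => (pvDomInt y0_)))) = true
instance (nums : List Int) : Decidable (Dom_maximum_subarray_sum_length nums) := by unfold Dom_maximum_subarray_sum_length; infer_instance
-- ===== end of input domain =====

-- B replaces A's quadratic nested scan by prefix sums plus a right-to-left suffix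
-- maximum of the prefix array (objective: faster, asymptotic O(n) vs O(n^2)).


-- comparison against the running maximum; `none` is Python's float('-inf') start value
def pvLtOpt : Option Int → Int → Bool
  | none, _ => true
  | some m, c => decide (m < c)

-- ===== PORT A =====
-- nested loops; state = (max_length, max_sum); inner state carries current_sum.
-- nums[j] is always in range (i ≤ j < n), so pyGetD's default is never used.
def maximum_subarray_sum_length (nums : List Int) : Int :=
  let n : Int := nums.length
  ((PySem.List.pyRange 0 n 1).foldl
    (fun (st : Int × Option Int) i =>
      ((PySem.List.pyRange i n 1).foldl
        (fun (acc : Int × (Int × Option Int)) j =>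
          let cur := acc.1 + PySem.List.pyGetD nums j 0
          if pvLtOpt acc.2.2 cur then (cur, (j - i + 1, some cur)) else (cur, acc.2))
        (0, st)).2)
    (0, none)).1

-- ===== PORT B =====
-- prefix sums of Source B: prefix = [0]; run = 0; for x in nums: run += x; prefix.append(run)
def pvPrefix (nums : List Int) : List Int :=
  (nums.foldl (fun (a : List Int × Int) x => (a.1 ++ [a.2 + x], a.2 + x)) ([0], 0)).1

-- Source B's right-to-left loop: state ((mv, mk), rev); rev.append after the update
def pvRevFold (prefixA : List Int) (n : Int) : (Int × Int) × List (Int × Int) :=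
  (PySem.List.pyRange (n - 1) (-1) (-1)).foldl
    (fun (acc : (Int × Int) × List (Int × Int)) k =>
      let pk := PySem.List.pyGetD prefixA k 0
      if acc.1.1 ≤ pk then ((pk, k), acc.2 ++ [(pk, k)])
      else (acc.1, acc.2 ++ [acc.1]))
    ((PySem.List.pyGetD prefixA n 0, n), [(PySem.List.pyGetD prefixA n 0, n)])

-- rev[::-1] is exactly List.reverse; all indices are in range, so pyGetD's default
-- is never used.
def maximum_subarray_sum_length_alt (nums : List Int) : Int :=
  let n : Int := nums.length
  let prefixA := pvPrefix nums
  let suffix := (pvRevFold prefixA n).2.reverse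
  ((PySem.List.pyRange 0 n 1).foldl
      (fun (st : Int × Option Int) i =>
        let sk := PySem.List.pyGetD suffix (i + 1) (0, 0)
        let s := sk.1 - PySem.List.pyGetD prefixA i 0
        if pvLtOpt st.2 s then (sk.2 - i, some s) else st)
      (0, none)).1

-- ===== PRECONDITION & SPEC =====
def Spec_maximum_subarray_sum_length (nums : List Int) (out : Int) : Prop := out = maximum_subarray_sum_length_alt nums
instance (nums : List Int) (out : Int) : Decidable (Spec_maximum_subarray_sum_length nums out) := by unfold Spec_maximum_subarray_sum_length; infer_instance

-- ===== CLAIM (what is proved, stated in full; the proofs are below) =====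
def Claim_equal_maximum_subarray_sum_length : Prop := ∀ (nums : List Int), Dom_maximum_subarray_sum_length nums → Spec_maximum_subarray_sum_length nums (maximum_subarray_sum_length nums)

-- ===== LEMMAS AND PROOFS =====

-- (best sum, earliest length) over the nonempty prefixes of l (junk (0,0) at [])
def pvBestC : List Int → Int × Int
  | [] => (0, 0)
  | x :: t =>
    match t with
    | [] => (x, 1)
    | _ :: _ =>
      let p := pvBestC t
      if 0 < p.1 then (x + p.1, p.2 + 1) else (x, 1)

def pvStep (s L : Int) (st : Int × Option Int) : Int × Option Int :=
  if pvLtOpt st.2 s then (L, some s) else st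

-- reference run over all suffixes
def pvRun : List Int → Int × Option Int → Int × Option Int
  | [], st => st
  | x :: t, st =>
    pvRun t (pvStep (pvBestC (x :: t)).1 (pvBestC (x :: t)).2 st)

def pvP (nums : List Int) (k : ℕ) : Int := (nums.take k).sum

-- suffix maxima of the prefix-sum sequence, earliest index on ties
def pvE (nums : List Int) (k : ℕ) : Int × Int :=
  if h : nums.length ≤ k then (pvP nums nums.length, (nums.length : Int))
  else
    let e := pvE nums (k + 1)
    if e.1 ≤ pvP nums k then (pvP nums k, (k : Int)) else e
termination_by nums.length - k

@[simp] lemma pvLtOpt_none (c : Int) : pvLtOpt none c = true := rfl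
@[simp] lemma pvLtOpt_some (m c : Int) : pvLtOpt (some m) c = decide (m < c) := rfl

lemma pvBestC_cons_cons (x y : Int) (t : List Int) :
    pvBestC (x :: y :: t)
      = if 0 < (pvBestC (y :: t)).1
        then (x + (pvBestC (y :: t)).1, (pvBestC (y :: t)).2 + 1) else (x, 1) := by
  simp only [pvBestC]

lemma pvStep_absorb_lt {st : Int × Option Int} {v w L1 L2 : Int} (h : w < v) :
    pvStep v L2 (pvStep w L1 st) = pvStep v L2 st := by
  obtain ⟨len, ms⟩ := st
  cases ms <;> simp only [pvStep, pvLtOpt_none, pvLtOpt_some] <;>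
    (split_ifs <;> simp_all <;> omega)

lemma pvStep_absorb_le {st : Int × Option Int} {v w L1 L2 : Int} (h : v ≤ w) :
    pvStep v L2 (pvStep w L1 st) = pvStep w L1 st := by
  obtain ⟨len, ms⟩ := st
  cases ms <;> simp only [pvStep, pvLtOpt_none, pvLtOpt_some] <;>
    (split_ifs <;> simp_all <;> omega)

-- A's inner loop computes pvStep of pvBestC of the processed suffix
lemma pvInnerA (nums : List Int) (i : Int) :
    ∀ (l : List Int) (j c : Int) (st : Int × Option Int), 0 ≤ j →
      nums.drop j.toNat = l →
      ((PySem.List.pyRange j (nums.length : Int) 1).foldl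
        (fun (acc : Int × (Int × Option Int)) jj =>
          let cur := acc.1 + PySem.List.pyGetD nums jj 0
          if pvLtOpt acc.2.2 cur then (cur, (jj - i + 1, some cur)) else (cur, acc.2))
        (c, st)).2
      = if l = [] then st
        else pvStep (c + (pvBestC l).1) (j - i + (pvBestC l).2) st := by
  intro l
  induction l with
  | nil =>
    intro j c st hj hd
    have hlen : nums.length ≤ j.toNat := List.drop_eq_nil_iff.mp hd
    rw [PySem.List.pyRange_one_eq_nil (by omega)]
    simp
  | cons x l' ih =>
    intro j c st hj hd
    have hlt : j.toNat < nums.length := by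
      by_contra hge
      rw [List.drop_eq_nil_iff.mpr (by omega)] at hd
      exact List.cons_ne_nil _ _ hd.symm
    have hx : PySem.List.pyGetD nums j 0 = x := by
      rw [PySem.List.pyGetD_eq_getElem nums 0 hj (by omega)]
      have h0 : (nums.drop j.toNat)[0]'(by simp [hd]) = x := by simp [hd]
      rw [List.getElem_drop] at h0
      simpa using h0
    have hd' : nums.drop (j + 1).toNat = l' := by
      have h1 : (j + 1).toNat = j.toNat + 1 := by omega
      have h2 := congrArg (List.drop 1) hd
      rw [List.drop_drop] at h2
      simpa [h1] using h2
    rw [PySem.List.pyRange_one_cons (by omega : j < (nums.length : Int)), List.foldl_cons]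
    simp only [hx]
    have heq : (if pvLtOpt st.2 (c + x) = true
          then ((c + x : Int), ((j - i + 1 : Int), some (c + x))) else (c + x, st))
        = (c + x, pvStep (c + x) (j - i + 1) st) := by
      by_cases hb : pvLtOpt st.2 (c + x) = true <;> simp [pvStep, hb]
    rw [heq, ih (j + 1) (c + x) _ (by omega) hd']
    cases l' with
    | nil => simp [pvBestC]
    | cons y t =>
      simp only [List.cons_ne_nil, if_false, pvBestC_cons_cons]
      by_cases hp : 0 < (pvBestC (y :: t)).1
      · rw [if_pos hp, pvStep_absorb_lt (by omega),
          show c + x + (pvBestC (y :: t)).1 = c + (x + (pvBestC (y :: t)).1) from by ring,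
          show j + 1 - i + (pvBestC (y :: t)).2 = j - i + ((pvBestC (y :: t)).2 + 1) from by ring]
      · rw [if_neg hp, pvStep_absorb_le (by omega)]

-- both outer loops reduce to pvRun
lemma pvRun_eq (nums : List Int) :
    ∀ (l : List Int) (i : Int) (st : Int × Option Int), 0 ≤ i →
      nums.drop i.toNat = l →
      (PySem.List.pyRange i (nums.length : Int) 1).foldl
        (fun st ii => pvStep (pvBestC (nums.drop ii.toNat)).1 (pvBestC (nums.drop ii.toNat)).2 st) st
      = pvRun l st := by
  intro l
  induction l with
  | nil =>
    intro i st hi hd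
    have hlen : nums.length ≤ i.toNat := List.drop_eq_nil_iff.mp hd
    rw [PySem.List.pyRange_one_eq_nil (by omega)]
    simp [pvRun]
  | cons x t ih =>
    intro i st hi hd
    have hlt : i.toNat < nums.length := by
      by_contra hge
      rw [List.drop_eq_nil_iff.mpr (by omega)] at hd
      exact List.cons_ne_nil _ _ hd.symm
    have hd' : nums.drop (i + 1).toNat = t := by
      have h1 : (i + 1).toNat = i.toNat + 1 := by omega
      have h2 := congrArg (List.drop 1) hd
      rw [List.drop_drop] at h2
      simpa [h1] using h2
    rw [PySem.List.pyRange_one_cons (by omega : i < (nums.length : Int))]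
    simp only [List.foldl_cons, hd]
    rw [ih (i + 1) _ (by omega) hd']
    simp only [pvRun]

lemma pvA_eq (nums : List Int) :
    maximum_subarray_sum_length nums = (pvRun nums (0, none)).1 := by
  show (List.foldl (fun (st : Int × Option Int) i =>
      (List.foldl (fun (acc : Int × (Int × Option Int)) j =>
          if pvLtOpt acc.2.2 (acc.1 + PySem.List.pyGetD nums j 0) = true
          then (acc.1 + PySem.List.pyGetD nums j 0, j - i + 1, some (acc.1 + PySem.List.pyGetD nums j 0))
          else (acc.1 + PySem.List.pyGetD nums j 0, acc.2))
        (0, st) (PySem.List.pyRange i (nums.length : Int))).2)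
      (0, none) (PySem.List.pyRange 0 (nums.length : Int))).1 = (pvRun nums (0, none)).1
  rw [PySem.List.foldl_congr_mem _ _
    (fun st ii => pvStep (pvBestC (nums.drop ii.toNat)).1 (pvBestC (nums.drop ii.toNat)).2 st) _
    (by
      intro st ii hmem
      have h := PySem.List.mem_pyRange_one.mp hmem
      rw [pvInnerA nums ii (nums.drop ii.toNat) ii 0 st h.1 rfl,
        if_neg (by simp only [List.drop_eq_nil_iff, not_le]; omega)]
      simp only [zero_add, sub_self, zero_add])]
  rw [pvRun_eq nums nums 0 (0, none) le_rfl (by simp)]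

lemma pvE_ge (nums : List Int) (k : ℕ) (h : nums.length ≤ k) :
    pvE nums k = (pvP nums nums.length, (nums.length : Int)) := by
  rw [pvE]
  simp [h]

lemma pvE_lt (nums : List Int) (k : ℕ) (h : k < nums.length) :
    pvE nums k = if (pvE nums (k + 1)).1 ≤ pvP nums k
      then (pvP nums k, (k : Int)) else pvE nums (k + 1) := by
  rw [pvE]
  simp [Nat.not_le.mpr h]

lemma pvP_succ (nums : List Int) (i : ℕ) (h : i < nums.length) :
    pvP nums (i + 1) = pvP nums i + nums[i] := by
  simpa [pvP] using List.sum_take_succ nums i h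

lemma pvBestC_eq_E (nums : List Int) :
    ∀ (i : ℕ), i < nums.length →
      pvBestC (nums.drop i) =
        ((pvE nums (i + 1)).1 - pvP nums i, (pvE nums (i + 1)).2 - (i : Int)) := by
  have main : ∀ (m i : ℕ), nums.length - i = m → i < nums.length →
      pvBestC (nums.drop i) =
        ((pvE nums (i + 1)).1 - pvP nums i, (pvE nums (i + 1)).2 - (i : Int)) := by
    intro m
    induction m with
    | zero => intro i hm hlt; omega
    | succ m ihm =>
      intro i hm hlt
      have hdc : nums.drop i = nums[i] :: nums.drop (i + 1) := List.drop_eq_getElem_cons hlt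
      by_cases hend : i + 1 < nums.length
      · have ih := ihm (i + 1) (by omega) hend
        obtain ⟨y, t, hyt⟩ : ∃ y t, nums.drop (i + 1) = y :: t := by
          rcases h : nums.drop (i + 1) with _ | ⟨y, t⟩
          · rw [List.drop_eq_nil_iff] at h; omega
          · exact ⟨y, t, rfl⟩
        rw [hdc, hyt, pvBestC_cons_cons, ← hyt, ih, pvE_lt nums (i + 1) hend]
        have hx : nums[i] = pvP nums (i + 1) - pvP nums i := by
          rw [pvP_succ nums i hlt]; ring
        by_cases hc : (pvE nums (i + 1 + 1)).1 ≤ pvP nums (i + 1)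
        · rw [if_neg (by simp only; omega), if_pos hc]
          refine Prod.ext ?_ ?_
          · simp [hx]
          · simp
        · rw [if_pos (by simp only; omega), if_neg hc]
          refine Prod.ext ?_ ?_
          · simp [hx]
          · simp
            ring
      · have hlen : nums.length = i + 1 := by omega
        have hnil : nums.drop (i + 1) = [] := List.drop_eq_nil_iff.mpr (by omega)
        rw [hdc, hnil, pvE_ge nums (i + 1) (by omega), hlen]
        have hx : nums[i] = pvP nums (i + 1) - pvP nums i := by
          rw [pvP_succ nums i hlt]; ring
        refine Prod.ext ?_ ?_
        · simp [pvBestC, hx]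
        · simp [pvBestC, hx]
  intro i
  exact main (nums.length - i) i rfl

lemma pvPrefix_spec :
    ∀ (l acc : List Int) (r : Int),
      (l.foldl (fun (a : List Int × Int) x => (a.1 ++ [a.2 + x], a.2 + x)) (acc, r)).1
      = acc ++ (List.range l.length).map (fun k => r + (l.take (k + 1)).sum) := by
  intro l
  induction l with
  | nil => intro acc r; simp
  | cons x t ih =>
    intro acc r
    simp only [List.foldl_cons]
    rw [ih (acc ++ [r + x]) (r + x), List.length_cons, List.range_succ_eq_map]
    simp [List.map_map, Function.comp, add_assoc]

lemma pvPrefix_eq (nums : List Int) :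
    pvPrefix nums = (List.range (nums.length + 1)).map (pvP nums) := by
  unfold pvPrefix
  rw [pvPrefix_spec nums [0] 0, List.range_succ_eq_map]
  simp [pvP, List.map_map, Function.comp]

lemma pvPget (nums : List Int) (k : Int) (h0 : 0 ≤ k) (h1 : k.toNat ≤ nums.length) :
    PySem.List.pyGetD ((List.range (nums.length + 1)).map (pvP nums)) k 0 = pvP nums k.toNat := by
  rw [PySem.List.pyGetD_of_nonneg _ _ h0, PySem.List.getD_map_range _ _ _ _ (by omega)]

lemma pvSuffix_spec (nums : List Int) :
    ∀ (k : ℕ), k ≤ nums.length → ∀ (lst : List (Int × Int)),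
      (PySem.List.pyRange ((k : Int) - 1) (-1) (-1)).foldl
        (fun (acc : (Int × Int) × List (Int × Int)) kk =>
          let pk := PySem.List.pyGetD ((List.range (nums.length + 1)).map (pvP nums)) kk 0
          if acc.1.1 ≤ pk then ((pk, kk), acc.2 ++ [(pk, kk)])
          else (acc.1, acc.2 ++ [acc.1]))
        (pvE nums k, lst)
      = (pvE nums 0, lst ++ (List.range k).map (fun j => pvE nums (k - 1 - j))) := by
  intro k
  induction k with
  | zero => intro _ lst; rw [PySem.List.pyRange_neg_one_eq_nil (by norm_num)]; simp
  | succ k ihk =>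
    intro hk lst
    have hcast : ((k + 1 : ℕ) : Int) - 1 = (k : Int) := by push_cast; ring
    rw [hcast, PySem.List.pyRange_neg_one_cons (by omega : (-1 : Int) < (k : Int))]
    simp only [List.foldl_cons]
    rw [pvPget nums (k : Int) (by omega) (by omega)]
    simp only [Int.toNat_natCast]
    have hstep : (if (pvE nums (k + 1)).1 ≤ pvP nums k
          then ((pvP nums k, (k : Int)), lst ++ [(pvP nums k, (k : Int))])
          else (pvE nums (k + 1), lst ++ [pvE nums (k + 1)]))
        = (pvE nums k, lst ++ [pvE nums k]) := by
      rw [pvE_lt nums k (by omega)]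
      by_cases hc : (pvE nums (k + 1)).1 ≤ pvP nums k <;> simp [hc]
    rw [hstep, ihk (by omega) (lst ++ [pvE nums k])]
    have hlist : (List.range (k + 1)).map (fun j => pvE nums (k + 1 - 1 - j))
        = pvE nums k :: (List.range k).map (fun j => pvE nums (k - 1 - j)) := by
      rw [List.range_succ_eq_map, List.map_cons, List.map_map]
      congr 1
      apply List.map_congr_left
      intro a ha
      simp only [Function.comp_apply]
      congr 1
      omega
    rw [hlist]
    simp [List.append_assoc]

lemma pvRev_map {β : Type} (f : ℕ → β) (n : ℕ) :
    ((List.range n).map (fun j => f (n - 1 - j))).reverse = (List.range n).map f := by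
  apply List.ext_getElem (by simp)
  intro i h1 h2
  simp only [List.getElem_reverse, List.getElem_map, List.getElem_range,
    List.length_map, List.length_range]
  congr 1
  simp at h1 h2
  omega

lemma pvSuffix_list (nums : List Int) :
    (pvRevFold ((List.range (nums.length + 1)).map (pvP nums)) (nums.length : Int)).2.reverse
      = (List.range (nums.length + 1)).map (pvE nums) := by
  unfold pvRevFold
  have hinit : PySem.List.pyGetD ((List.range (nums.length + 1)).map (pvP nums)) (nums.length : Int) 0
      = pvP nums nums.length := by
    rw [pvPget nums _ (by omega) (by omega)]
    simp
  have hE : (pvP nums nums.length, (nums.length : Int)) = pvE nums nums.length :=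
    (pvE_ge nums nums.length le_rfl).symm
  rw [hinit, hE, pvSuffix_spec nums nums.length le_rfl [pvE nums nums.length]]
  simp only [List.singleton_append]
  rw [List.reverse_cons, pvRev_map (pvE nums) nums.length, List.range_succ, List.map_append]
  simp

lemma pvB_eq (nums : List Int) :
    maximum_subarray_sum_length_alt nums = (pvRun nums (0, none)).1 := by
  show (List.foldl (fun (st : Int × Option Int) i =>
      if pvLtOpt st.2 ((PySem.List.pyGetD (pvRevFold (pvPrefix nums) (nums.length : Int)).2.reverse (i + 1) (0, 0)).1
          - PySem.List.pyGetD (pvPrefix nums) i 0) = true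
      then ((PySem.List.pyGetD (pvRevFold (pvPrefix nums) (nums.length : Int)).2.reverse (i + 1) (0, 0)).2 - i,
        some ((PySem.List.pyGetD (pvRevFold (pvPrefix nums) (nums.length : Int)).2.reverse (i + 1) (0, 0)).1
          - PySem.List.pyGetD (pvPrefix nums) i 0))
      else st)
    (0, none) (PySem.List.pyRange 0 (nums.length : Int))).1 = (pvRun nums (0, none)).1
  rw [pvPrefix_eq, pvSuffix_list]
  rw [PySem.List.foldl_congr_mem _ _
    (fun st ii => pvStep (pvBestC (nums.drop ii.toNat)).1 (pvBestC (nums.drop ii.toNat)).2 st) _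
    (by
      intro st ii hmem
      have h := PySem.List.mem_pyRange_one.mp hmem
      have h1 : PySem.List.pyGetD ((List.range (nums.length + 1)).map (pvP nums)) ii 0
          = pvP nums ii.toNat := pvPget nums ii h.1 (by omega)
      have h2 : PySem.List.pyGetD ((List.range (nums.length + 1)).map (pvE nums)) (ii + 1) (0, 0)
          = pvE nums (ii.toNat + 1) := by
        rw [PySem.List.pyGetD_of_nonneg _ _ (by omega),
          show (ii + 1).toNat = ii.toNat + 1 from by omega,
          PySem.List.getD_map_range _ _ _ _ (by omega)]
      rw [h1, h2]
      have hB := pvBestC_eq_E nums ii.toNat (by omega)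
      have hB1 : (pvBestC (nums.drop ii.toNat)).1 = (pvE nums (ii.toNat + 1)).1 - pvP nums ii.toNat := by
        rw [hB]
      have hB2 : (pvBestC (nums.drop ii.toNat)).2 = (pvE nums (ii.toNat + 1)).2 - (ii.toNat : Int) := by
        rw [hB]
      simp only [hB1, hB2, Int.toNat_of_nonneg h.1]
      by_cases hb : pvLtOpt st.2 ((pvE nums (ii.toNat + 1)).1 - pvP nums ii.toNat) = true <;>
        simp [pvStep, hb])]
  exact congrArg Prod.fst (pvRun_eq nums nums 0 (0, none) le_rfl (by simp))

-- ===== VERDICT (by name: the statement is the Claim_ definition above) =====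
theorem maximum_subarray_sum_length_spec : Claim_equal_maximum_subarray_sum_length := by
  intro nums _
  unfold Spec_maximum_subarray_sum_length
  rw [pvA_eq, pvB_eq]
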